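-- pv_equiv track=rewrite | github.com/q1960314/openclaw-agent-rules | scripts/runtime/decision_engine.py | infer_risk_assessment
-- ===== SOURCE A (Python) =====
-- def infer_risk_assessment(risk_tags: list[str], intent: str, mode: str) -> list[dict[str, str]]:
--     priority_map = {
--         'manual_trade_risk': ('critical', '涉及实盘/交易语义，必须人工确认后才能视为正式动作'),
--         'config_change_risk': ('high', '配置/生效类变更容易影响真实运行环境，必须保留审批与回滚边界'),
--         'code_change_risk': ('high', '代码改动需要最小变更、可追踪 diff 与后续验收'),
--         'drawdown_risk': ('high', '需要优先关注风险暴露与回撤恶化可能'),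
--         'backtest_bias_risk': ('high', '回测结论可能受未来函数、样本泄漏或口径偏差影响'),
--         'overfit_risk': ('medium', '优化/因子/参数任务需要防止样本内过拟合'),
--         'data_quality_risk': ('medium', '数据质量缺口会污染后续判断与结果'),
--     }
--     items: list[dict[str, str]] = []
--     for tag in risk_tags:
--         priority, rationale = priority_map.get(tag, ('medium', '需要纳入结构化风险观察'))
--         items.append({'tag': tag, 'priority': priority, 'rationale': rationale})
--     if not items:
--         baseline = 'high' if mode == 'build' else 'medium'
--         items.append({'tag': 'baseline_execution_risk', 'priority': baseline, 'rationale': f'{intent} 任务仍需保留最小风险边界与验收口径'})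
--     priority_order = {'critical': 0, 'high': 1, 'medium': 2, 'low': 3}
--     return sorted(items, key=lambda x: (priority_order.get(x['priority'], 9), x['tag']))
-- ===== SOURCE B (Python) =====
-- def _classify(tag: str) -> tuple[str, str]:
--     if tag == 'manual_trade_risk':
--         return ('critical', '涉及实盘/交易语义，必须人工确认后才能视为正式动作')
--     if tag == 'config_change_risk':
--         return ('high', '配置/生效类变更容易影响真实运行环境，必须保留审批与回滚边界')
--     if tag == 'code_change_risk':
--         return ('high', '代码改动需要最小变更、可追踪 diff 与后续验收')
--     if tag == 'drawdown_risk':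
--         return ('high', '需要优先关注风险暴露与回撤恶化可能')
--     if tag == 'backtest_bias_risk':
--         return ('high', '回测结论可能受未来函数、样本泄漏或口径偏差影响')
--     if tag == 'overfit_risk':
--         return ('medium', '优化/因子/参数任务需要防止样本内过拟合')
--     if tag == 'data_quality_risk':
--         return ('medium', '数据质量缺口会污染后续判断与结果')
--     return ('medium', '需要纳入结构化风险观察')
--
--
-- def infer_risk_assessment(risk_tags: list[str], intent: str, mode: str) -> list[dict[str, str]]:
--     if not risk_tags:
--         baseline = 'high' if mode == 'build' else 'medium'
--         return [{'tag': 'baseline_execution_risk', 'priority': baseline,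
--                  'rationale': f'{intent} 任务仍需保留最小风险边界与验收口径'}]
--     out: list[dict[str, str]] = []
--     for p in ('critical', 'high', 'medium', 'low'):
--         for tag in sorted(t for t in risk_tags if _classify(t)[0] == p):
--             out.append({'tag': tag, 'priority': p, 'rationale': _classify(tag)[1]})
--     return out
-- ===== Notes on version B (the rewrite author's own statement) =====
-- stated objective: alternative
-- what changed: Instead of building item dicts and running one stable sort on composite (priority-rank, tag) keys, B returns the baseline item early on empty input and otherwise walks the fixed priority ladder, filtering and sorting the raw tag strings per priority and only then building the item dicts.
import Mathlib
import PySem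

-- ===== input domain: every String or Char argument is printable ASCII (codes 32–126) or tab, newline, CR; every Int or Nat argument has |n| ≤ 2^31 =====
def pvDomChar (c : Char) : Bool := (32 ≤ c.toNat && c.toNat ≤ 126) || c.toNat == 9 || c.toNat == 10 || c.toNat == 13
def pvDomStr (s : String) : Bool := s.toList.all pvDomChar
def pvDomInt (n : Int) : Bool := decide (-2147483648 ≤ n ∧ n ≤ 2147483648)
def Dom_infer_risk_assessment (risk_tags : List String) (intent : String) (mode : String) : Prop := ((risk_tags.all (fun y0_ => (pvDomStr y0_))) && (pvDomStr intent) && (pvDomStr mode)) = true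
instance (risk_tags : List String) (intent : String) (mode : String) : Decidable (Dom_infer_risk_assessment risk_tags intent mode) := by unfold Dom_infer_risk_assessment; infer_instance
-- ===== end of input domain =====

-- B replaces A's build-items-then-one-composite-key-sort pipeline by an early return of the
-- baseline item on empty input and otherwise a walk of the fixed priority ladder that filters
-- and sorts the raw tag strings per priority, building the item dicts only at emission
-- (objective: alternative).

-- ===== PORT A =====
-- x['priority'] / x['tag'] are ported as Dict.getD with default "": every item is built with both
-- keys present, so Python's KeyError is unreachable and the default is never used.
def infer_risk_assessment (risk_tags : List String) (intent : String) (mode : String) : List (List (String × String)) :=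
  let priority_map : PySem.Dict String (String × String) := ⟨[
    ("manual_trade_risk", ("critical", "涉及实盘/交易语义，必须人工确认后才能视为正式动作")),
    ("config_change_risk", ("high", "配置/生效类变更容易影响真实运行环境，必须保留审批与回滚边界")),
    ("code_change_risk", ("high", "代码改动需要最小变更、可追踪 diff 与后续验收")),
    ("drawdown_risk", ("high", "需要优先关注风险暴露与回撤恶化可能")),
    ("backtest_bias_risk", ("high", "回测结论可能受未来函数、样本泄漏或口径偏差影响")),
    ("overfit_risk", ("medium", "优化/因子/参数任务需要防止样本内过拟合")),
    ("data_quality_risk", ("medium", "数据质量缺口会污染后续判断与结果"))]⟩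
  let items : List (List (String × String)) := risk_tags.foldl (fun acc tag =>
    acc ++ [[("tag", tag),
             ("priority", (PySem.Dict.getD priority_map tag ("medium", "需要纳入结构化风险观察")).1),
             ("rationale", (PySem.Dict.getD priority_map tag ("medium", "需要纳入结构化风险观察")).2)]]) []
  let items := if items = [] then
      items ++ [[("tag", "baseline_execution_risk"),
                 ("priority", if mode = "build" then "high" else "medium"),
                 ("rationale", intent ++ " 任务仍需保留最小风险边界与验收口径")]]
    else items
  let priority_order : PySem.Dict String Int := ⟨[("critical", 0), ("high", 1), ("medium", 2), ("low", 3)]⟩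
  PySem.List.sorted2 items
    (fun x => PySem.Dict.getD priority_order (PySem.Dict.getD ⟨x⟩ "priority" "") 9)
    (fun x => PySem.Dict.getD ⟨x⟩ "tag" "")

-- ===== PORT B =====
-- Source B's _classify if-chain
def pvClassify (tag : String) : String × String :=
  if tag == "manual_trade_risk" then ("critical", "涉及实盘/交易语义，必须人工确认后才能视为正式动作")
  else if tag == "config_change_risk" then ("high", "配置/生效类变更容易影响真实运行环境，必须保留审批与回滚边界")
  else if tag == "code_change_risk" then ("high", "代码改动需要最小变更、可追踪 diff 与后续验收")
  else if tag == "drawdown_risk" then ("high", "需要优先关注风险暴露与回撤恶化可能")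
  else if tag == "backtest_bias_risk" then ("high", "回测结论可能受未来函数、样本泄漏或口径偏差影响")
  else if tag == "overfit_risk" then ("medium", "优化/因子/参数任务需要防止样本内过拟合")
  else if tag == "data_quality_risk" then ("medium", "数据质量缺口会污染后续判断与结果")
  else ("medium", "需要纳入结构化风险观察")

def infer_risk_assessment_alt (risk_tags : List String) (intent : String) (mode : String) : List (List (String × String)) :=
  match risk_tags with
  | [] =>
    let baseline := if mode == "build" then "high" else "medium"
    [[("tag", "baseline_execution_risk"), ("priority", baseline),
      ("rationale", intent ++ " 任务仍需保留最小风险边界与验收口径")]]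
  | _ :: _ =>
    (["critical", "high", "medium", "low"] : List String).foldl (fun out p =>
      (PySem.List.sorted (risk_tags.filter (fun t => (pvClassify t).1 == p)) (fun t => t)).foldl
        (fun out tag => out ++ [[("tag", tag), ("priority", p), ("rationale", (pvClassify tag).2)]])
        out) []

-- ===== PRECONDITION & SPEC =====
def Spec_infer_risk_assessment (risk_tags : List String) (intent : String) (mode : String) (out : List (List (String × String))) : Prop := out = infer_risk_assessment_alt risk_tags intent mode
instance (risk_tags : List String) (intent : String) (mode : String) (out : List (List (String × String))) : Decidable (Spec_infer_risk_assessment risk_tags intent mode out) := by unfold Spec_infer_risk_assessment; infer_instance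

-- ===== CLAIM (what is proved, stated in full; the proofs are below) =====
def Claim_equal_infer_risk_assessment : Prop := ∀ (risk_tags : List String) (intent : String) (mode : String), Dom_infer_risk_assessment risk_tags intent mode → Spec_infer_risk_assessment risk_tags intent mode (infer_risk_assessment risk_tags intent mode)

-- ===== LEMMAS AND PROOFS =====

-- proof-side names, definitionally equal to A's inline terms
def pvDflt : String × String := ("medium", "需要纳入结构化风险观察")
def pvPM : PySem.Dict String (String × String) := ⟨[
    ("manual_trade_risk", ("critical", "涉及实盘/交易语义，必须人工确认后才能视为正式动作")),
    ("config_change_risk", ("high", "配置/生效类变更容易影响真实运行环境，必须保留审批与回滚边界")),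
    ("code_change_risk", ("high", "代码改动需要最小变更、可追踪 diff 与后续验收")),
    ("drawdown_risk", ("high", "需要优先关注风险暴露与回撤恶化可能")),
    ("backtest_bias_risk", ("high", "回测结论可能受未来函数、样本泄漏或口径偏差影响")),
    ("overfit_risk", ("medium", "优化/因子/参数任务需要防止样本内过拟合")),
    ("data_quality_risk", ("medium", "数据质量缺口会污染后续判断与结果"))]⟩
def pvPO : PySem.Dict String Int := ⟨[("critical", 0), ("high", 1), ("medium", 2), ("low", 3)]⟩
def pvItem (tag : String) : List (String × String) :=
  [("tag", tag), ("priority", (PySem.Dict.getD pvPM tag pvDflt).1), ("rationale", (PySem.Dict.getD pvPM tag pvDflt).2)]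
def pvBaseline (intent : String) (mode : String) : List (String × String) :=
  [("tag", "baseline_execution_risk"), ("priority", if mode = "build" then "high" else "medium"),
   ("rationale", intent ++ " 任务仍需保留最小风险边界与验收口径")]
def pvPrio (it : List (String × String)) : String := PySem.Dict.getD ⟨it⟩ "priority" ""
def pvTag (it : List (String × String)) : String := PySem.Dict.getD ⟨it⟩ "tag" ""
def pvK1 (it : List (String × String)) : Int := PySem.Dict.getD pvPO (pvPrio it) 9
def pvOL : List String := ["critical", "high", "medium", "low"]
def pvMk (p : String) (tag : String) : List (String × String) :=
  [("tag", tag), ("priority", p), ("rationale", (pvClassify tag).2)]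

lemma pv_classify_eq (t : String) : PySem.Dict.getD pvPM t pvDflt = pvClassify t := by
  simp only [pvPM, pvClassify, pvDflt, PySem.Dict.getD, PySem.Dict.get?, List.find?]
  (repeat' split) <;> simp_all

lemma pv_insertBy_congr_mem {α : Type} (b1 b2 : α → α → Bool) (x : α) (ys : List α)
    (h : ∀ y ∈ ys, b1 x y = b2 x y) :
    PySem.List.insertBy b1 x ys = PySem.List.insertBy b2 x ys := by
  induction ys with
  | nil => rfl
  | cons y ys ih =>
    show (if b1 x y then x :: y :: ys else y :: PySem.List.insertBy b1 x ys)
       = (if b2 x y then x :: y :: ys else y :: PySem.List.insertBy b2 x ys)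
    rw [h y (by simp), ih (fun z hz => h z (by simp [hz]))]

lemma pv_insertBy_append_skip {α : Type} (before : α → α → Bool) (x : α) (L1 L2 : List α)
    (h : ∀ y ∈ L1, before x y = false) :
    PySem.List.insertBy before x (L1 ++ L2) = L1 ++ PySem.List.insertBy before x L2 := by
  induction L1 with
  | nil => simp
  | cons y L1 ih =>
    show (if before x y then x :: y :: (L1 ++ L2) else y :: PySem.List.insertBy before x (L1 ++ L2))
       = y :: (L1 ++ PySem.List.insertBy before x L2)
    rw [h y (by simp), if_neg (by simp), ih (fun z hz => h z (by simp [hz]))]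

lemma pv_insertBy_append_stop {α : Type} (before : α → α → Bool) (x : α) (L1 L2 : List α)
    (h : ∀ z ∈ L2, before x z = true) :
    PySem.List.insertBy before x (L1 ++ L2) = PySem.List.insertBy before x L1 ++ L2 := by
  induction L1 with
  | nil =>
    cases L2 with
    | nil => rfl
    | cons z L2 =>
      show (if before x z then x :: z :: L2 else z :: PySem.List.insertBy before x L2) = [x] ++ z :: L2
      rw [h z (by simp), if_pos rfl]; rfl
  | cons y L1 ih =>
    show (if before x y then x :: y :: (L1 ++ L2) else y :: PySem.List.insertBy before x (L1 ++ L2))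
       = (if before x y then x :: y :: L1 else y :: PySem.List.insertBy before x L1) ++ L2
    by_cases hb : before x y = true
    · rw [if_pos hb, if_pos hb]; rfl
    · rw [if_neg hb, if_neg hb, List.cons_append, ih]

-- inserting one element into a flatten of strictly-ordered k1-buckets lands in its own bucket,
-- where the lexicographic before-test degenerates to the k2 test
lemma pv_insert_flatten {α : Type} (x : α) (k1 : α → Int) (k2 : α → String) (G : Int → List α) :
    ∀ vs : List Int, vs.Pairwise (· < ·) → k1 x ∈ vs → (∀ v ∈ vs, ∀ y ∈ G v, k1 y = v) →
    PySem.List.insertBy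
        (fun a b => decide (k1 a < k1 b) || (!decide (k1 b < k1 a) && decide (k2 a < k2 b))) x
        ((vs.map G).flatten)
      = (vs.map (fun v => if v = k1 x then
          PySem.List.insertBy (fun a b => decide (k2 a < k2 b)) x (G v) else G v)).flatten := by
  intro vs
  induction vs with
  | nil => intro _ hx _; simp at hx
  | cons v vs ih =>
    intro hp hx hG
    have hlt : ∀ w ∈ vs, v < w := fun w hw => (List.pairwise_cons.mp hp).1 w hw
    simp only [List.map_cons, List.flatten_cons]
    by_cases hv : v = k1 x
    · have hstop : ∀ z ∈ (vs.map G).flatten,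
          (decide (k1 x < k1 z) || (!decide (k1 z < k1 x) && decide (k2 x < k2 z))) = true := by
        intro z hz
        obtain ⟨l, hl, hzl⟩ := List.mem_flatten.mp hz
        obtain ⟨w, hw, rfl⟩ := List.mem_map.mp hl
        have : k1 z = w := hG w (by simp [hw]) z hzl
        have : k1 x < k1 z := by rw [this, ← hv]; exact hlt w hw
        simp [this]
      rw [pv_insertBy_append_stop _ _ _ _ hstop, if_pos hv]
      have hcongr : PySem.List.insertBy
          (fun a b => decide (k1 a < k1 b) || (!decide (k1 b < k1 a) && decide (k2 a < k2 b))) x (G v)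
          = PySem.List.insertBy (fun a b => decide (k2 a < k2 b)) x (G v) := by
        apply pv_insertBy_congr_mem
        intro y hy
        have hky : k1 y = v := hG v (by simp) y hy
        have h1 : ¬ (k1 x < k1 y) := by rw [hky, ← hv]; exact lt_irrefl v
        have h2 : ¬ (k1 y < k1 x) := by rw [hky, ← hv]; exact lt_irrefl v
        simp [h1, h2]
      rw [hcongr]
      have : (vs.map (fun w => if w = k1 x then
          PySem.List.insertBy (fun a b => decide (k2 a < k2 b)) x (G w) else G w)) = vs.map G := by
        apply List.map_congr_left
        intro w hw
        rw [if_neg (by have := hlt w hw; omega)]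
      rw [this]
    · have hx' : k1 x ∈ vs := by
        rcases List.mem_cons.mp hx with h | h
        · exact absurd h.symm hv
        · exact h
      have hvx : v < k1 x := hlt _ hx'
      have hskip : ∀ y ∈ G v,
          (decide (k1 x < k1 y) || (!decide (k1 y < k1 x) && decide (k2 x < k2 y))) = false := by
        intro y hy
        have hky : k1 y = v := hG v (by simp) y hy
        have h1 : ¬ (k1 x < k1 y) := by rw [hky]; omega
        have h2 : k1 y < k1 x := by rw [hky]; exact hvx
        simp [h1, h2]
      rw [pv_insertBy_append_skip _ _ _ _ hskip,
          ih (List.pairwise_cons.mp hp).2 hx' (fun w hw y hy => hG w (by simp [hw]) y hy),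
          if_neg hv]

-- a stable sort under the composite (k1, k2) key is the concatenation, in increasing k1-order,
-- of the k1-buckets each stably sorted under k2
lemma pv_bucket {α : Type} (k1 : α → Int) (k2 : α → String) (vs : List Int)
    (hp : vs.Pairwise (· < ·)) :
    ∀ xs : List α, (∀ a ∈ xs, k1 a ∈ vs) →
    PySem.List.sorted2 xs k1 k2
      = (vs.map (fun v => PySem.List.sorted (xs.filter (fun a => k1 a == v)) k2)).flatten := by
  intro xs
  induction xs using List.reverseRecOn with
  | nil => simp [PySem.List.sorted2, PySem.List.sorted]
  | append_singleton xs x ih =>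
    intro hcov
    have hcov' : ∀ a ∈ xs, k1 a ∈ vs := fun a ha => hcov a (by simp [ha])
    have hxv : k1 x ∈ vs := hcov x (by simp)
    have hsnoc : PySem.List.sorted2 (xs ++ [x]) k1 k2
        = PySem.List.insertBy
            (fun a b => decide (k1 a < k1 b) || (!decide (k1 b < k1 a) && decide (k2 a < k2 b))) x
            (PySem.List.sorted2 xs k1 k2) := by
      simp [PySem.List.sorted2, List.foldl_append]
    have hG : ∀ v ∈ vs, ∀ y ∈ PySem.List.sorted (xs.filter (fun a => k1 a == v)) k2, k1 y = v := by
      intro v _ y hy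
      have := (PySem.List.mem_sorted _ _ _ _).mp hy
      exact by simpa using (List.mem_filter.mp this).2
    rw [hsnoc, ih hcov', pv_insert_flatten x k1 k2 _ vs hp hxv hG]
    congr 1
    apply List.map_congr_left
    intro v _
    by_cases hv : v = k1 x
    · rw [if_pos hv]
      have : (xs ++ [x]).filter (fun a => k1 a == v) = xs.filter (fun a => k1 a == v) ++ [x] := by
        simp [List.filter_append, hv]
      rw [this]
      simp [PySem.List.sorted, List.foldl_append]
    · rw [if_neg hv]
      have : (xs ++ [x]).filter (fun a => k1 a == v) = xs.filter (fun a => k1 a == v) := by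
        simp [List.filter_append]
        intro h; exact absurd h.symm hv
      rw [this]

lemma pv_k1_mem (it : List (String × String)) (h : pvPrio it ∈ pvOL) :
    pvK1 it ∈ ([0, 1, 2, 3] : List Int) := by
  simp only [pvOL, List.mem_cons, List.not_mem_nil, or_false] at h
  rcases h with h | h | h | h <;> (simp only [pvK1, h]; decide)

lemma pv_filter_eq (items : List (List (String × String)))
    (h : ∀ it ∈ items, pvPrio it ∈ pvOL) (p : String) (v : Int) (hpv : PySem.Dict.getD pvPO p 9 = v)
    (hmem : p ∈ pvOL) :
    items.filter (fun a => pvK1 a == v) = items.filter (fun it => pvPrio it == p) := by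
  apply List.filter_congr
  intro it hit
  have h' := h it hit
  simp only [pvOL, List.mem_cons, List.not_mem_nil, or_false] at h' hmem
  subst hpv
  rcases h' with h' | h' | h' | h' <;> rcases hmem with hp | hp | hp | hp <;>
    (subst hp; simp only [pvK1, h']; decide)

lemma pv_prio_mk (a b c : String) :
    pvPrio [("tag", a), ("priority", b), ("rationale", c)] = b := by
  simp [pvPrio, PySem.Dict.getD, PySem.Dict.get?, List.find?]

lemma pv_item_prio (t : String) : pvPrio (pvItem t) = (pvClassify t).1 := by
  rw [pvItem, pv_prio_mk, pv_classify_eq]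

lemma pv_item_tag (t : String) : pvTag (pvItem t) = t := by
  simp [pvTag, pvItem, PySem.Dict.getD, PySem.Dict.get?]

lemma pv_map_items_prio (risk_tags : List String) :
    ∀ it ∈ risk_tags.map pvItem, pvPrio it ∈ pvOL := by
  intro it hit
  obtain ⟨t, _, rfl⟩ := List.mem_map.mp hit
  rw [pv_item_prio]
  simp only [pvClassify, pvOL]
  (repeat' split) <;> simp

lemma pv_insertBy_map {α β : Type} (f : α → β) (b : β → β → Bool) (b' : α → α → Bool)
    (h : ∀ x y, b (f x) (f y) = b' x y) (x : α) (ys : List α) :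
    PySem.List.insertBy b (f x) (ys.map f) = (PySem.List.insertBy b' x ys).map f := by
  induction ys with
  | nil => rfl
  | cons y ys ih =>
    show (if b (f x) (f y) then f x :: f y :: ys.map f
          else f y :: PySem.List.insertBy b (f x) (ys.map f))
       = ((if b' x y then x :: y :: ys else y :: PySem.List.insertBy b' x ys).map f)
    rw [h x y]
    by_cases hb : b' x y <;> simp [hb, ih]

lemma pv_sorted_map {α β κ : Type} [LinearOrder κ] (f : α → β) (k : β → κ) (xs : List α) :
    PySem.List.sorted (xs.map f) k = (PySem.List.sorted xs (fun x => k (f x))).map f := by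
  rw [PySem.List.sorted_eq_foldl_insertBy, PySem.List.sorted_eq_foldl_insertBy, List.foldl_map]
  suffices h : ∀ acc : List α,
      xs.foldl (fun acc x => PySem.List.insertBy (fun a b => decide (k a < k b)) (f x) acc) (acc.map f)
        = (xs.foldl (fun acc x =>
            PySem.List.insertBy (fun a b => decide (k (f a) < k (f b))) x acc) acc).map f by
    simpa using h []
  induction xs with
  | nil => intro acc; rfl
  | cons x xs ih =>
    intro acc
    simp only [List.foldl_cons]
    rw [pv_insertBy_map f _ (fun a b => decide (k (f a) < k (f b))) (fun _ _ => rfl) x acc]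
    exact ih _

lemma pv_filter_map {α β : Type} (f : α → β) (q : β → Bool) (l : List α) :
    (l.map f).filter q = (l.filter (fun x => q (f x))).map f := by
  induction l with
  | nil => rfl
  | cons x l ih => by_cases h : q (f x) <;> simp [h, ih]

-- one priority bucket of A's sorted items equals B's sorted-tags bucket, item-built after the sort
lemma pv_bucket_item (risk_tags : List String) (p : String) :
    PySem.List.sorted ((risk_tags.map pvItem).filter (fun it => pvPrio it == p)) pvTag
      = (PySem.List.sorted (risk_tags.filter (fun t => (pvClassify t).1 == p)) (fun t => t)).map (pvMk p) := by
  have hf : (risk_tags.map pvItem).filter (fun it => pvPrio it == p)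
      = (risk_tags.filter (fun t => (pvClassify t).1 == p)).map pvItem := by
    rw [pv_filter_map]
    congr 1
    apply List.filter_congr
    intro t _
    rw [pv_item_prio]
  rw [hf, pv_sorted_map pvItem pvTag]
  have hk : (fun t => pvTag (pvItem t)) = (fun t : String => t) := by
    funext t; exact pv_item_tag t
  rw [hk]
  apply List.map_congr_left
  intro t ht
  have ht' : t ∈ risk_tags.filter (fun t => (pvClassify t).1 == p) :=
    (PySem.List.mem_sorted _ _ _ _).mp ht
  have hp : (pvClassify t).1 = p := by simpa using (List.mem_filter.mp ht').2
  simp only [pvItem, pvMk, pv_classify_eq, hp]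

-- core: on a nonempty tag list, A's composite sort of the built items equals B's ladder pass
lemma pv_core (risk_tags : List String) :
    PySem.List.sorted2 (risk_tags.map pvItem) pvK1 pvTag
      = pvOL.foldl (fun out p =>
          out ++ (PySem.List.sorted (risk_tags.filter (fun t => (pvClassify t).1 == p)) (fun t => t)).map (pvMk p)) [] := by
  rw [pv_bucket pvK1 pvTag [0, 1, 2, 3] (by decide) _
        (fun a ha => pv_k1_mem a (pv_map_items_prio risk_tags a ha)),
      PySem.List.foldl_append_eq_flatMap]
  simp only [List.nil_append, pvOL, List.flatMap_cons, List.flatMap_nil, List.map_cons,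
    List.map_nil, List.flatten_cons, List.flatten_nil, List.append_nil]
  rw [pv_filter_eq _ (pv_map_items_prio risk_tags) "critical" 0 (by decide) (by simp [pvOL]),
      pv_filter_eq _ (pv_map_items_prio risk_tags) "high" 1 (by decide) (by simp [pvOL]),
      pv_filter_eq _ (pv_map_items_prio risk_tags) "medium" 2 (by decide) (by simp [pvOL]),
      pv_filter_eq _ (pv_map_items_prio risk_tags) "low" 3 (by decide) (by simp [pvOL]),
      pv_bucket_item risk_tags "critical", pv_bucket_item risk_tags "high",
      pv_bucket_item risk_tags "medium", pv_bucket_item risk_tags "low"]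

-- B's nested append loop per priority is the map of the bucket
lemma pv_fold_fold (S : String → List String) (ps : List String) :
    ∀ out : List (List (String × String)),
    ps.foldl (fun out p => (S p).foldl (fun out tag => out ++ [pvMk p tag]) out) out
      = ps.foldl (fun out p => out ++ (S p).map (pvMk p)) out := by
  induction ps with
  | nil => intro out; rfl
  | cons p ps ih =>
    intro out
    simp only [List.foldl_cons]
    rw [PySem.List.foldl_append_singleton_eq_map (pvMk p) (S p) out]
    exact ih _

-- ===== VERDICT (by name: the statement is the Claim_ definition above) =====
theorem infer_risk_assessment_spec : Claim_equal_infer_risk_assessment := by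
  intro risk_tags intent mode _
  show infer_risk_assessment risk_tags intent mode = infer_risk_assessment_alt risk_tags intent mode
  cases risk_tags with
  | nil =>
    show PySem.List.sorted2 [pvBaseline intent mode] pvK1 pvTag
        = infer_risk_assessment_alt [] intent mode
    by_cases hm : mode = "build" <;>
      simp [PySem.List.sorted2, PySem.List.insertBy, infer_risk_assessment_alt,
        pvBaseline, hm]
  | cons t ts =>
    have hA : infer_risk_assessment (t :: ts) intent mode
        = PySem.List.sorted2 ((t :: ts).map pvItem) pvK1 pvTag := by
      show PySem.List.sorted2
          (if (t :: ts).foldl (fun acc tag => acc ++ [pvItem tag]) [] = []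
           then (t :: ts).foldl (fun acc tag => acc ++ [pvItem tag]) [] ++ [pvBaseline intent mode]
           else (t :: ts).foldl (fun acc tag => acc ++ [pvItem tag]) []) pvK1 pvTag
        = PySem.List.sorted2 ((t :: ts).map pvItem) pvK1 pvTag
      rw [PySem.List.foldl_append_singleton_eq_map pvItem (t :: ts) []]
      simp
    have hB : infer_risk_assessment_alt (t :: ts) intent mode
        = pvOL.foldl (fun out p =>
            out ++ (PySem.List.sorted ((t :: ts).filter (fun t => (pvClassify t).1 == p)) (fun t => t)).map (pvMk p)) [] := by
      show (["critical", "high", "medium", "low"] : List String).foldl (fun out p =>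
          (PySem.List.sorted ((t :: ts).filter (fun t => (pvClassify t).1 == p)) (fun t => t)).foldl
            (fun out tag => out ++ [pvMk p tag]) out) [] = _
      exact pv_fold_fold _ _ []
    rw [hA, hB]
    exact pv_core (t :: ts)
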